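-- pv_equiv track=rewrite | github.com/mischaikow/aoc | 2021/day_17.py | y_target_check
-- ===== SOURCE A (Python) =====
-- def y_target_check(speed, y_target):
--     start_speed = speed
--     y, steps, peak = 0, 0, 0
--     step_ans = []
--     while y >= y_target[0]:
--         if speed == 0:
--             peak = y
--         if y <= y_target[1]:
--             step_ans.append(steps)
--         steps += 1
--         y += speed
--         speed -= 1
--     return (start_speed, step_ans, peak)
-- ===== SOURCE B (Python) =====
-- def y_target_check(speed, y_target):
--     # Closed-form trajectory: height after t steps is h(t) = t*speed - t*(t-1)//2.
--     # Binary search for the last step T with h(T) >= y_target[0]; peak by formula.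
--     lo = y_target[0]
--     if lo > 0:
--         return (speed, [], 0)
--     hi = y_target[1]
--
--     def height(t):
--         return t * speed - t * (t - 1) // 2
--
--     peak = speed * (speed + 1) // 2 if speed >= 0 else 0
--     a, b = 0, (2 * speed if speed > 0 else 0) - lo + 2   # h(a) >= lo, h(b) < lo
--     while b - a > 1:
--         m = (a + b) // 2
--         if height(m) >= lo:
--             a = m
--         else:
--             b = m
--     return (speed, [t for t in range(a + 1) if height(t) <= hi], peak)
-- ===== Notes on version B (the rewrite author's own statement) =====
-- stated objective: alternative
-- what changed: B replaces A's step-by-step velocity/position simulation by the closed-form height h(t)=t*speed-t*(t-1)//2, a binary search for the last step still above the target's lower bound, a filtered range for the in-target steps, and the peak formula speed*(speed+1)//2.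
import Mathlib
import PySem

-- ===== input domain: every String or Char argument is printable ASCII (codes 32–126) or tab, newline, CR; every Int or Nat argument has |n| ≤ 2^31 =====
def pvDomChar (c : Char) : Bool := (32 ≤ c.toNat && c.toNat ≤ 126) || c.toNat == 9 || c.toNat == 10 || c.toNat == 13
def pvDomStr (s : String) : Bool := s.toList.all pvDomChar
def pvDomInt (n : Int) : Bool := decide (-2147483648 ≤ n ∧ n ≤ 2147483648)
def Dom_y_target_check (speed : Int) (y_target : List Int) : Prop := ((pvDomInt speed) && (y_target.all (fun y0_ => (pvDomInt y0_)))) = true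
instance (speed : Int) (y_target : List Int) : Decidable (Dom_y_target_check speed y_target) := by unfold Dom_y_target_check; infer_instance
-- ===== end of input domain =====

-- B replaces A's step-by-step projectile simulation by the closed-form height
-- h(t) = t*speed - t*(t-1)//2, a binary search for the last in-range step, and a
-- peak formula (objective: alternative algorithm, similar cost).

-- ===== PORT A =====
-- A's while loop, with a fuel parameter that only makes the recursion structural;
-- the caller passes fuel provably larger than the number of iterations (loopA_char below).
-- State (y, speed, steps, peak, step_ans); returns (peak, step_ans).
def yLoopA : Nat → Int → Int → Int → Int → Int → Int → List Int → Int × List Int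
  | 0, _, _, _, _, _, peak, acc => (peak, acc)
  | fuel + 1, lo, hi, y, speed, steps, peak, acc =>
    if lo ≤ y then
      yLoopA fuel lo hi (y + speed) (speed - 1) (steps + 1)
        (if speed = 0 then y else peak)
        (if y ≤ hi then acc ++ [steps] else acc)
    else (peak, acc)

def y_target_check (speed : Int) (y_target : List Int) : Int × List Int × Int :=
  match PySem.List.pyGet? y_target 0 with
  | none => (speed, [], 0)        -- IndexError in Python: outside Pre_
  | some lo =>
    if lo ≤ 0 then                -- the while guard 0 ≥ y_target[0] holds at entry, so the body runs
      match PySem.List.pyGet? y_target 1 with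
      | none => (speed, [], 0)    -- IndexError in Python: outside Pre_
      | some hi =>
        let r := yLoopA ((if 0 < speed then 2 * speed else 0) - lo + 3).toNat lo hi 0 speed 0 0 []
        (speed, r.2, r.1)
    else (speed, [], 0)           -- while guard false at entry: loop never runs, y_target[1] never read

-- ===== PORT B =====
def heightB (speed t : Int) : Int := t * speed - PySem.Int.floordiv (t * (t - 1)) 2

-- B's binary-search while loop, with a fuel parameter that only makes the recursion
-- structural; the caller passes (b - a).toNat, which is provably enough (bsearchB_spec below).
def bsearchB : Nat → Int → Int → Int → Int → Int
  | 0, _, _, a, _ => a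
  | fuel + 1, speed, lo, a, b =>
    if 1 < b - a then
      let m := PySem.Int.floordiv (a + b) 2
      if lo ≤ heightB speed m then bsearchB fuel speed lo m b else bsearchB fuel speed lo a m
    else a

def y_target_check_alt (speed : Int) (y_target : List Int) : Int × List Int × Int :=
  match PySem.List.pyGet? y_target 0 with
  | none => (speed, [], 0)        -- IndexError in Python: outside Pre_
  | some lo =>
    if 0 < lo then (speed, [], 0)
    else
      match PySem.List.pyGet? y_target 1 with
      | none => (speed, [], 0)    -- IndexError in Python: outside Pre_
      | some hi =>
        let peak := if 0 ≤ speed then PySem.Int.floordiv (speed * (speed + 1)) 2 else 0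
        let U := (if 0 < speed then 2 * speed else 0) - lo + 2
        let a := bsearchB (U - 0).toNat speed lo 0 U
        (speed, (PySem.List.pyRange 0 (a + 1) 1).filter (fun t => decide (heightB speed t ≤ hi)), peak)

-- ===== PRECONDITION & SPEC =====
-- Pre_ excludes exactly the inputs on which A raises IndexError: the empty list
-- (y_target[0] fails) and one-element lists whose single entry is ≤ 0 (the loop
-- body then reads y_target[1]).
def Pre_y_target_check (speed : Int) (y_target : List Int) : Prop :=
  y_target ≠ [] ∧ (y_target.headI ≤ 0 → 2 ≤ y_target.length)
instance (speed : Int) (y_target : List Int) : Decidable (Pre_y_target_check speed y_target) := by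
  unfold Pre_y_target_check; infer_instance

def pvWitness_y_target_check : Int × List Int := (3, [-6, -2])

def Spec_y_target_check (speed : Int) (y_target : List Int) (out : Int × List Int × Int) : Prop := out = y_target_check_alt speed y_target
instance (speed : Int) (y_target : List Int) (out : Int × List Int × Int) : Decidable (Spec_y_target_check speed y_target out) := by unfold Spec_y_target_check; infer_instance

-- ===== CLAIM (what is proved, stated in full; the proofs are below) =====
def Claim_equal_y_target_check : Prop := ∀ (speed : Int) (y_target : List Int), Dom_y_target_check speed y_target → Pre_y_target_check speed y_target → Spec_y_target_check speed y_target (y_target_check speed y_target)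

-- ===== LEMMAS AND PROOFS =====

lemma two_heightB (s t : Int) : 2 * heightB s t = 2 * (t * s) - t * (t - 1) := by
  have h : Even (t * (t - 1)) := by
    have h2 := Int.even_mul_succ_self (t - 1)
    simpa [mul_comm] using h2
  obtain ⟨k, hk⟩ := h
  simp only [heightB, PySem.Int.floordiv_eq_ediv_of_pos (by norm_num : (0:Int) < 2)]
  rw [hk]
  generalize t * s = u
  omega

lemma heightB_zero (s : Int) : heightB s 0 = 0 := by
  have h := two_heightB s 0
  norm_num at h
  omega

lemma heightB_succ (s t : Int) : heightB s (t + 1) = heightB s t + (s - t) := by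
  have h1 := two_heightB s (t + 1)
  have h2 := two_heightB s t
  ring_nf at h1 h2 ⊢
  linarith

lemma height_lt_mono (s lo u v : Int) (hlo : lo ≤ 0) (hu : 0 ≤ u) (huv : u ≤ v)
    (h : heightB s u < lo) : heightB s v < lo := by
  have h2u := two_heightB s u
  have h2v := two_heightB s v
  have hsu : s < u := by
    by_contra hc
    push_neg at hc
    have key : 0 ≤ u * (2 * s - u + 1) := mul_nonneg hu (by linarith)
    nlinarith
  have key : 0 ≤ (v - u) * (u + v - 1 - 2 * s) := mul_nonneg (by omega) (by omega)
  nlinarith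

lemma heightB_nonneg_peak (s : Int) (hs : 0 ≤ s) : 0 ≤ heightB s s := by
  have h := two_heightB s s
  nlinarith

lemma height_bound (s lo : Int) (hlo : lo ≤ 0) :
    heightB s ((if 0 < s then 2 * s else 0) - lo + 2) < lo := by
  split_ifs with hs
  · have h2 := two_heightB s (2 * s - lo + 2)
    nlinarith
  · push_neg at hs
    have h2 := two_heightB s (0 - lo + 2)
    nlinarith

lemma heightB_self (s : Int) : heightB s s = PySem.Int.floordiv (s * (s + 1)) 2 := by
  have h2 := two_heightB s s
  obtain ⟨k, hk⟩ := Int.even_mul_succ_self s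
  rw [PySem.Int.floordiv_eq_ediv_of_pos (by norm_num : (0:Int) < 2), hk]
  have h3 : s * (s - 1) = (k + k) - 2 * s := by rw [← hk]; ring
  have h4 : 2 * (s * s) = (k + k) - ((k + k) - 2 * (s * s)) := by ring
  have h5 : s * s = (k + k) - s - (s * s) + (2 * (s * s) - (k + k) + s) := by ring
  -- relate s*s to k: s*(s+1) = s*s + s = k + k
  have h6 : s * s = (k + k) - s := by nlinarith [hk]
  rw [h3, h6] at h2
  omega

lemma bsearchB_spec (s lo : Int) (n : ℕ) :
    ∀ (a b : Int), (b - a).toNat ≤ n → lo ≤ heightB s a → heightB s b < lo → a < b →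
      lo ≤ heightB s (bsearchB n s lo a b) ∧ heightB s (bsearchB n s lo a b + 1) < lo ∧
        a ≤ bsearchB n s lo a b := by
  induction n with
  | zero => intro a b hn ha hb hab; omega
  | succ n ih =>
    intro a b hn ha hb hab
    rw [bsearchB]
    have hm : PySem.Int.floordiv (a + b) 2 = (a + b) / 2 :=
      PySem.Int.floordiv_eq_ediv_of_pos (by norm_num)
    by_cases hgt : 1 < b - a
    · rw [if_pos hgt]
      simp only [hm]
      by_cases hc : lo ≤ heightB s ((a + b) / 2)
      · rw [if_pos hc]
        exact And.imp_right (And.imp_right (by omega)) <|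
          ih ((a + b) / 2) b (by omega) hc hb (by omega)
      · rw [if_neg hc]
        push_neg at hc
        exact ih a ((a + b) / 2) (by omega) ha hc (by omega)
    · rw [if_neg hgt]
      have hb1 : b = a + 1 := by omega
      subst hb1
      exact ⟨ha, hb, le_refl a⟩

lemma loopA_char (s0 lo hi T : Int) (hlo : lo ≤ 0)
    (hTin : ∀ u, 0 ≤ u → u ≤ T → lo ≤ heightB s0 u)
    (hTout : ∀ u, T < u → heightB s0 u < lo) (n : ℕ) :
    ∀ (t : Int), (T + 2 - t).toNat ≤ n → 0 ≤ t → t ≤ T + 1 → ∀ (peak : Int) (acc : List Int),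
      yLoopA n lo hi (heightB s0 t) (s0 - t) t peak acc =
        ((if t ≤ s0 then heightB s0 s0 else peak),
         acc ++ (PySem.List.pyRange t (T + 1) 1).filter (fun u => decide (heightB s0 u ≤ hi))) := by
  have hs0T : 0 ≤ s0 → s0 ≤ T := by
    intro hs
    by_contra hc
    push_neg at hc
    have h1 := heightB_nonneg_peak s0 hs
    have h2 := hTout s0 hc
    omega
  induction n with
  | zero => intro t hn ht0 htT peak acc; omega
  | succ n ihl =>
    intro t hn ht0 htT peak acc
    rw [yLoopA]
    by_cases hrun : t ≤ T
    · rw [if_pos (hTin t ht0 hrun)]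
      have e1 : heightB s0 t + (s0 - t) = heightB s0 (t + 1) := by
        rw [heightB_succ]
      have e2 : s0 - t - 1 = s0 - (t + 1) := by ring
      rw [e1, e2, ihl (t + 1) (by omega) (by omega) (by omega)]
      rw [PySem.List.pyRange_one_cons (by omega : t < T + 1), List.filter_cons]
      simp only [Prod.mk.injEq]
      constructor
      · by_cases hta : t + 1 ≤ s0
        · rw [if_pos hta, if_pos (by omega)]
        · by_cases htb : t ≤ s0
          · have hz : s0 - t = 0 := by omega
            rw [if_neg hta, if_pos hz, if_pos htb]
            have hts : t = s0 := by omega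
            rw [hts]
          · rw [if_neg hta, if_neg (by omega : ¬ s0 - t = 0), if_neg htb]
      · by_cases hh : heightB s0 t ≤ hi
        · rw [if_pos hh, if_pos (by simpa using hh)]
          simp [List.append_assoc]
        · rw [if_neg hh, if_neg (by simpa using hh)]
    · rw [if_neg (by have := hTout t (by omega); omega)]
      have ht1 : t = T + 1 := by omega
      have hns : ¬ t ≤ s0 := by
        intro hc
        have hs : 0 ≤ s0 := le_trans ht0 hc
        have := hs0T hs
        omega
      rw [if_neg hns, PySem.List.pyRange_one_eq_nil (by omega)]
      simp

-- ===== VERDICT (by name: the statement is the Claim_ definition above) =====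
theorem y_target_check_spec : Claim_equal_y_target_check := by
  intro speed y_target hdom hpre
  unfold Spec_y_target_check
  obtain ⟨hne, hlen⟩ := hpre
  cases y_target with
  | nil => exact absurd rfl hne
  | cons lo rest =>
    have hg0 : PySem.List.pyGet? (lo :: rest) (0 : Int) = some lo := by simp [pysem]
    simp only [y_target_check, y_target_check_alt, hg0]
    by_cases hlo : lo ≤ 0
    · have h2 : 2 ≤ (lo :: rest).length := hlen (by simpa using hlo)
      cases rest with
      | nil => simp at h2
      | cons hi rest' =>
        have hg1 : PySem.List.pyGet? (lo :: hi :: rest') (1 : Int) = some hi := by simp [pysem]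
        rw [if_pos hlo, if_neg (by omega : ¬ 0 < lo), hg1]
        have hUnn : 0 ≤ (if 0 < speed then 2 * speed else 0) := by split_ifs <;> omega
        set U := (if 0 < speed then 2 * speed else 0) - lo + 2 with hU
        have hUpos : 0 < U := by omega
        have hf0 : lo ≤ heightB speed 0 := by rw [heightB_zero]; omega
        have hfU : heightB speed U < lo := height_bound speed lo hlo
        obtain ⟨hA, hB, hC⟩ := bsearchB_spec speed lo (U - 0).toNat 0 U le_rfl hf0 hfU hUpos
        set a := bsearchB (U - 0).toNat speed lo 0 U with ha
        have hTin : ∀ u, 0 ≤ u → u ≤ a → lo ≤ heightB speed u := by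
          intro u hu hua
          by_contra hc
          push_neg at hc
          have := height_lt_mono speed lo u a hlo hu hua hc
          omega
        have hTout : ∀ u, a < u → heightB speed u < lo := fun u hu =>
          height_lt_mono speed lo (a + 1) u hlo (by omega) (by omega) hB
        have haU : a < U := by
          by_contra hcu
          push_neg at hcu
          have := hTin U (by omega) hcu
          omega
        have hchar := loopA_char speed lo hi a hlo hTin hTout
          ((if 0 < speed then 2 * speed else 0) - lo + 3).toNat 0
          (by omega) (by omega) (by omega) 0 []
        rw [heightB_zero, sub_zero] at hchar
        simp only [hchar, heightB_self]
        simp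
    · rw [if_neg hlo, if_pos (by omega : 0 < lo)]
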